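-- pv_equiv track=rewrite | github.com/Herotank1234/AdventOfCode | 2019/q22.py | pow_compose
-- ===== SOURCE A (Python) =====
-- def compose(coeff1, coeff2, length):
--   a = (coeff1[0] * coeff2[0]) % length
--   b = ((coeff1[1] * coeff2[0]) + coeff2[1]) % length
--   return (a, b)
--
-- def pow_compose(coeff, length, reps):
--   result = (1, 0)
--   while reps > 0:
--     if reps % 2 != 0:
--       result = compose(result, coeff, length)
--     reps = reps // 2
--     coeff = compose(coeff, coeff, length)
--   return result
-- ===== SOURCE B (Python) =====
-- def compose(coeff1, coeff2, length):
--   a = (coeff1[0] * coeff2[0]) % length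
--   b = ((coeff1[1] * coeff2[0]) + coeff2[1]) % length
--   return (a, b)
--
-- def pow_compose(coeff, length, reps):
--   if reps <= 0:
--     return (1, 0)
--   half = pow_compose(coeff, length, reps // 2)
--   result = compose(half, half, length)
--   if reps % 2 != 0:
--     result = compose(result, coeff, length)
--   return result
-- ===== Notes on version B (the rewrite author's own statement) =====
-- stated objective: alternative
-- what changed: Replaces A's iterative while-loop binary exponentiation (accumulator + repeated squaring of a mutated coeff) by direct recursion on reps: recursively compute the half power, square it with compose, and compose with coeff once more when reps is odd.
import Mathlib
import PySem

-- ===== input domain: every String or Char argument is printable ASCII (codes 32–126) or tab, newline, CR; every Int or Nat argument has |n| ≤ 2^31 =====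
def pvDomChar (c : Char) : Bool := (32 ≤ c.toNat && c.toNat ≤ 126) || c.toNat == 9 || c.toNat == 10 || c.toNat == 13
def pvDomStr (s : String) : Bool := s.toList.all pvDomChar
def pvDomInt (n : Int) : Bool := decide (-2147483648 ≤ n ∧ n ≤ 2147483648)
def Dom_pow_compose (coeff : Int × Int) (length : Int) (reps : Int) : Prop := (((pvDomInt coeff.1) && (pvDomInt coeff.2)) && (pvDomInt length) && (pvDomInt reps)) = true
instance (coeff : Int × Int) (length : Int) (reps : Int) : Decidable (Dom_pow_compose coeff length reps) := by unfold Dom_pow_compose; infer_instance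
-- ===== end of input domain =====

-- B replaces A's iterative binary-exponentiation loop by direct recursion on reps
-- (square the half-power, multiply in coeff when reps is odd); same compose helper,
-- same O(log reps) cost — objective: alternative decomposition.

-- ===== PORT A =====
-- shared helper: both Pythons define this identical `compose`
def compose (c1 c2 : Int × Int) (length : Int) : Int × Int :=
  (PySem.Int.mod (c1.1 * c2.1) length, PySem.Int.mod (c1.2 * c2.1 + c2.2) length)

-- the while-loop of A, state (result, coeff, reps)
def powLoop (result coeff : Int × Int) (length reps : Int) : Int × Int :=
  if h : reps > 0 then
    powLoop (if PySem.Int.mod reps 2 ≠ 0 then compose result coeff length else result)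
      (compose coeff coeff length) length (PySem.Int.floordiv reps 2)
  else result
termination_by reps.toNat
decreasing_by
  have h2 : PySem.Int.floordiv reps 2 = reps / 2 :=
    PySem.Int.floordiv_eq_ediv_of_pos (by norm_num)
  rw [h2]; omega

def pow_compose (coeff : Int × Int) (length : Int) (reps : Int) : Int × Int :=
  powLoop (1, 0) coeff length reps

-- ===== PORT B =====
def pow_compose_alt (coeff : Int × Int) (length : Int) (reps : Int) : Int × Int :=
  if h : reps ≤ 0 then (1, 0)
  else
    let half := pow_compose_alt coeff length (PySem.Int.floordiv reps 2)
    let result := compose half half length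
    if PySem.Int.mod reps 2 ≠ 0 then compose result coeff length else result
termination_by reps.toNat
decreasing_by
  have h2 : PySem.Int.floordiv reps 2 = reps / 2 :=
    PySem.Int.floordiv_eq_ediv_of_pos (by norm_num)
  rw [h2]; omega

-- ===== PRECONDITION & SPEC =====
-- Pre_ excludes length = 0 with reps > 0: there Python's `%` raises ZeroDivisionError in
-- both A and B (with reps ≤ 0 neither ever takes a modulus, so length = 0 is then fine).
def Pre_pow_compose (coeff : Int × Int) (length : Int) (reps : Int) : Prop :=
  reps ≤ 0 ∨ length ≠ 0
instance (coeff : Int × Int) (length : Int) (reps : Int) : Decidable (Pre_pow_compose coeff length reps) := by unfold Pre_pow_compose; infer_instance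

def pvWitness_pow_compose : (Int × Int) × Int × Int := ((3, 5), 10, 6)

def Spec_pow_compose (coeff : Int × Int) (length : Int) (reps : Int) (out : Int × Int) : Prop := out = pow_compose_alt coeff length reps
instance (coeff : Int × Int) (length : Int) (reps : Int) (out : Int × Int) : Decidable (Spec_pow_compose coeff length reps out) := by unfold Spec_pow_compose; infer_instance

-- ===== CLAIM (what is proved, stated in full; the proofs are below) =====
def Claim_equal_pow_compose : Prop := ∀ (coeff : Int × Int) (length : Int) (reps : Int), Dom_pow_compose coeff length reps → Pre_pow_compose coeff length reps → Spec_pow_compose coeff length reps (pow_compose coeff length reps)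

-- ===== LEMMAS AND PROOFS =====

-- geometric sum ∑_{i<n} a^i: applying x ↦ a·x+b  n times sends x to a^n·x + b·S a n
def S (a : Int) (n : Nat) : Int := ∑ i ∈ Finset.range n, a ^ i

theorem S_succ (a : Int) (n : Nat) : S a (n + 1) = S a n + a ^ n := by
  simp [S, Finset.sum_range_succ]

theorem S_succ' (a : Int) (n : Nat) : S a (n + 1) = 1 + a * S a n := by
  rw [S, Finset.sum_range_succ']
  simp only [pow_succ, pow_zero, ← Finset.sum_mul]
  rw [← S]; ring

theorem S_add (a : Int) (m n : Nat) : S a (m + n) = S a m + a ^ m * S a n := by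
  induction n with
  | zero => simp [S]
  | succ k ih =>
      have : m + (k + 1) = (m + k) + 1 := by omega
      rw [this, S_succ, ih, S_succ, pow_add]; ring

theorem S_sq (a : Int) (q : Nat) : (1 + a) * S (a ^ 2) q = S a (2 * q) := by
  induction q with
  | zero => simp [S]
  | succ k ih =>
      calc (1 + a) * S (a ^ 2) (k + 1)
          = (1 + a) * S (a ^ 2) k + (1 + a) * (a ^ 2) ^ k := by rw [S_succ]; ring
        _ = S a (2 * k) + (1 + a) * a ^ (2 * k) := by rw [ih, ← pow_mul]
        _ = (S a (2 * k) + a ^ (2 * k)) + a ^ (2 * k) * a := by ring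
        _ = S a (2 * k + 1 + 1) := by rw [S_succ, S_succ, pow_succ]
        _ = S a (2 * (k + 1)) := by have h2 : 2 * k + 1 + 1 = 2 * (k + 1) := by omega
                                    rw [h2]

-- Python's floor-mod is determined by the Euclidean residue class
theorem fmod_congr {L a b : Int} (h : a % L = b % L) : Int.fmod a L = Int.fmod b L := by
  have hd : L ∣ a ↔ L ∣ b := by
    rw [Int.dvd_iff_emod_eq_zero, Int.dvd_iff_emod_eq_zero, h]
  rw [Int.fmod_eq_emod, Int.fmod_eq_emod, h]
  by_cases h0 : 0 ≤ L <;> simp [h0, hd]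

theorem fmod_modEq (a L : Int) : Int.ModEq L (Int.fmod a L) a := by
  show Int.fmod a L % L = a % L
  rw [Int.fmod_eq_emod]
  split_ifs with h
  · simp [Int.emod_emod_of_dvd a (dvd_refl L)]
  · rw [Int.add_emod_right, Int.emod_emod_of_dvd a (dvd_refl L)]

theorem S_modEq {L a b : Int} (h : Int.ModEq L a b) (n : Nat) :
    Int.ModEq L (S a n) (S b n) := by
  induction n with
  | zero => simp [S]
  | succ m ih => rw [S_succ, S_succ]; exact ih.add (h.pow m)

-- A's loop computes res ∘ coeff^reps, reduced mod length
theorem powLoop_eq (L : Int) : ∀ (n : Nat) (r : Int), r.toNat = n → 0 < r →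
    ∀ (res c : Int × Int),
    powLoop res c L r =
      (Int.fmod (res.1 * c.1 ^ r.toNat) L,
       Int.fmod (res.2 * c.1 ^ r.toNat + c.2 * S c.1 r.toNat) L) := by
  intro n
  induction n using Nat.strong_induction_on with
  | _ n ih =>
    intro r hn hr res c
    have hq : PySem.Int.floordiv r 2 = r / 2 :=
      PySem.Int.floordiv_eq_ediv_of_pos (by norm_num)
    have hm : PySem.Int.mod r 2 = r % 2 :=
      PySem.Int.mod_eq_emod_of_pos (by norm_num)
    rw [powLoop]
    simp only [hr, dif_pos, hq, hm]
    set q : Int := r / 2 with hqdef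
    by_cases hq0 : q = 0
    · -- r = 1: one more iteration with reps = 0
      have hr1 : r = 1 := by omega
      subst hr1
      rw [powLoop]
      norm_num [compose, PySem.Int.mod, S]
    · have hqpos : 0 < q := by omega
      have hlt : q.toNat < n := by omega
      rw [ih q.toNat hlt q rfl hqpos]
      have hb : r % 2 = 0 ∨ r % 2 = 1 := by omega
      have hsplit : r.toNat = 2 * q.toNat + (r % 2).toNat := by omega
      -- congruences for the squared coefficient
      have hc1 : Int.ModEq L (compose c c L).1 (c.1 * c.1) := fmod_modEq _ _
      have hc2 : Int.ModEq L (compose c c L).2 (c.2 * c.1 + c.2) := fmod_modEq _ _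
      have hcp : Int.ModEq L ((compose c c L).1 ^ q.toNat) ((c.1 * c.1) ^ q.toNat) :=
        hc1.pow _
      have hS : Int.ModEq L (S (compose c c L).1 q.toNat) (S (c.1 * c.1) q.toNat) :=
        S_modEq hc1 _
      have hpow2 : (c.1 * c.1) ^ q.toNat = c.1 ^ (2 * q.toNat) := by
        rw [pow_mul]; ring_nf
      have hSd : (c.2 * c.1 + c.2) * S (c.1 * c.1) q.toNat = c.2 * S c.1 (2 * q.toNat) := by
        rw [show c.1 * c.1 = c.1 ^ 2 by ring, ← S_sq]; ring
      rcases hb with hb | hb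
      · -- even reps: result unchanged this iteration
        simp only [hb]
        norm_num
        constructor
        · apply fmod_congr
          calc res.1 * (compose c c L).1 ^ q.toNat
              ≡ res.1 * (c.1 * c.1) ^ q.toNat [ZMOD L] := (Int.ModEq.refl _).mul hcp
            _ = res.1 * c.1 ^ r.toNat := by rw [hpow2, hsplit, hb]; norm_num
        · apply fmod_congr
          calc res.2 * (compose c c L).1 ^ q.toNat + (compose c c L).2 * S (compose c c L).1 q.toNat
              ≡ res.2 * (c.1 * c.1) ^ q.toNat + (c.2 * c.1 + c.2) * S (c.1 * c.1) q.toNat [ZMOD L] :=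
                ((Int.ModEq.refl _).mul hcp).add (hc2.mul hS)
            _ = res.2 * c.1 ^ r.toNat + c.2 * S c.1 r.toNat := by
                rw [hSd, hpow2, hsplit, hb]; norm_num
      · -- odd reps: result := compose result coeff first
        simp only [hb]
        norm_num [compose]
        have hrt : r.toNat = 2 * q.toNat + 1 := by omega
        have hres1 : Int.ModEq L (Int.fmod (res.1 * c.1) L) (res.1 * c.1) := fmod_modEq _ _
        have hres2 : Int.ModEq L (Int.fmod (res.2 * c.1 + c.2) L) (res.2 * c.1 + c.2) :=
          fmod_modEq _ _
        constructor
        · apply fmod_congr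
          calc Int.fmod (res.1 * c.1) L * (compose c c L).1 ^ q.toNat
              ≡ (res.1 * c.1) * (c.1 * c.1) ^ q.toNat [ZMOD L] := hres1.mul hcp
            _ = res.1 * c.1 ^ r.toNat := by
                rw [hpow2, hrt, pow_succ]; ring
        · apply fmod_congr
          calc Int.fmod (res.2 * c.1 + c.2) L * (compose c c L).1 ^ q.toNat
                + (compose c c L).2 * S (compose c c L).1 q.toNat
              ≡ (res.2 * c.1 + c.2) * (c.1 * c.1) ^ q.toNat
                + (c.2 * c.1 + c.2) * S (c.1 * c.1) q.toNat [ZMOD L] :=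
                (hres2.mul hcp).add (hc2.mul hS)
            _ = res.2 * c.1 ^ r.toNat + c.2 * S c.1 r.toNat := by
                rw [hSd, hpow2, hrt, S_succ, pow_succ]; ring

-- B computes the same reduced pair
theorem alt_eq (L : Int) : ∀ (n : Nat) (r : Int), r.toNat = n → 0 < r →
    ∀ (c : Int × Int),
    pow_compose_alt c L r =
      (Int.fmod (c.1 ^ r.toNat) L, Int.fmod (c.2 * S c.1 r.toNat) L) := by
  intro n
  induction n using Nat.strong_induction_on with
  | _ n ih =>
    intro r hn hr c
    have hq : PySem.Int.floordiv r 2 = r / 2 :=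
      PySem.Int.floordiv_eq_ediv_of_pos (by norm_num)
    have hm : PySem.Int.mod r 2 = r % 2 :=
      PySem.Int.mod_eq_emod_of_pos (by norm_num)
    rw [pow_compose_alt]
    have hnle : ¬ r ≤ 0 := by omega
    simp only [hnle, dif_neg, not_false_iff, hq, hm]
    set q : Int := r / 2 with hqdef
    by_cases hq0 : q = 0
    · have hr1 : r = 1 := by omega
      subst hr1
      rw [pow_compose_alt]
      norm_num [compose, PySem.Int.mod, S]
      apply fmod_congr
      calc Int.fmod 1 L * c.1 ≡ 1 * c.1 [ZMOD L] := (fmod_modEq 1 L).mul_right c.1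
        _ = c.1 := one_mul c.1
    · have hqpos : 0 < q := by omega
      have hlt : q.toNat < n := by omega
      rw [ih q.toNat hlt q rfl hqpos]
      have hb : r % 2 = 0 ∨ r % 2 = 1 := by omega
      have hsplit : r.toNat = 2 * q.toNat + (r % 2).toNat := by omega
      have h1 : Int.ModEq L (Int.fmod (c.1 ^ q.toNat) L) (c.1 ^ q.toNat) := fmod_modEq _ _
      have h2 : Int.ModEq L (Int.fmod (c.2 * S c.1 q.toNat) L) (c.2 * S c.1 q.toNat) :=
        fmod_modEq _ _
      have hdbl : S c.1 q.toNat + c.1 ^ q.toNat * S c.1 q.toNat = S c.1 (2 * q.toNat) := by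
        rw [two_mul, S_add]
      rcases hb with hb | hb
      · simp only [hb]
        norm_num [compose]
        constructor
        · apply fmod_congr
          calc Int.fmod (c.1 ^ q.toNat) L * Int.fmod (c.1 ^ q.toNat) L
              ≡ c.1 ^ q.toNat * c.1 ^ q.toNat [ZMOD L] := h1.mul h1
            _ = c.1 ^ r.toNat := by rw [← pow_add, hsplit, hb]; norm_num; ring_nf
        · apply fmod_congr
          calc Int.fmod (c.2 * S c.1 q.toNat) L * Int.fmod (c.1 ^ q.toNat) L
                + Int.fmod (c.2 * S c.1 q.toNat) L
              ≡ c.2 * S c.1 q.toNat * c.1 ^ q.toNat + c.2 * S c.1 q.toNat [ZMOD L] :=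
                (h2.mul h1).add h2
            _ = c.2 * S c.1 r.toNat := by
                rw [hsplit, hb]; norm_num; rw [← hdbl]; ring
      · simp only [hb]
        norm_num [compose]
        have hrt : r.toNat = 2 * q.toNat + 1 := by omega
        have hsq : Int.ModEq L (Int.fmod (Int.fmod (c.1 ^ q.toNat) L * Int.fmod (c.1 ^ q.toNat) L) L)
            (c.1 ^ (2 * q.toNat)) := by
          calc Int.fmod (Int.fmod (c.1 ^ q.toNat) L * Int.fmod (c.1 ^ q.toNat) L) L
              ≡ Int.fmod (c.1 ^ q.toNat) L * Int.fmod (c.1 ^ q.toNat) L [ZMOD L] := fmod_modEq _ _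
            _ ≡ c.1 ^ q.toNat * c.1 ^ q.toNat [ZMOD L] := h1.mul h1
            _ = c.1 ^ (2 * q.toNat) := by rw [two_mul, pow_add]
        have hsb : Int.ModEq L
            (Int.fmod (Int.fmod (c.2 * S c.1 q.toNat) L * Int.fmod (c.1 ^ q.toNat) L
              + Int.fmod (c.2 * S c.1 q.toNat) L) L)
            (c.2 * S c.1 (2 * q.toNat)) := by
          calc Int.fmod (Int.fmod (c.2 * S c.1 q.toNat) L * Int.fmod (c.1 ^ q.toNat) L
                + Int.fmod (c.2 * S c.1 q.toNat) L) L
              ≡ Int.fmod (c.2 * S c.1 q.toNat) L * Int.fmod (c.1 ^ q.toNat) L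
                + Int.fmod (c.2 * S c.1 q.toNat) L [ZMOD L] := fmod_modEq _ _
            _ ≡ c.2 * S c.1 q.toNat * c.1 ^ q.toNat + c.2 * S c.1 q.toNat [ZMOD L] :=
                (h2.mul h1).add h2
            _ = c.2 * S c.1 (2 * q.toNat) := by rw [← hdbl]; ring
        constructor
        · apply fmod_congr
          calc Int.fmod (Int.fmod (c.1 ^ q.toNat) L * Int.fmod (c.1 ^ q.toNat) L) L * c.1
              ≡ c.1 ^ (2 * q.toNat) * c.1 [ZMOD L] := hsq.mul_right c.1
            _ = c.1 ^ r.toNat := by rw [hrt, pow_succ]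
        · apply fmod_congr
          calc Int.fmod (Int.fmod (c.2 * S c.1 q.toNat) L * Int.fmod (c.1 ^ q.toNat) L
                + Int.fmod (c.2 * S c.1 q.toNat) L) L * c.1 + c.2
              ≡ c.2 * S c.1 (2 * q.toNat) * c.1 + c.2 [ZMOD L] :=
                (hsb.mul_right c.1).add (Int.ModEq.refl _)
            _ = c.2 * S c.1 r.toNat := by rw [hrt, S_succ']; ring

-- ===== VERDICT (by name: the statement is the Claim_ definition above) =====
theorem pow_compose_spec : Claim_equal_pow_compose := by
  intro coeff length reps _ _
  show pow_compose coeff length reps = pow_compose_alt coeff length reps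
  by_cases hr : 0 < reps
  · rw [pow_compose, powLoop_eq length reps.toNat reps rfl hr,
        alt_eq length reps.toNat reps rfl hr]
    norm_num
  · rw [pow_compose, powLoop, pow_compose_alt]
    simp [hr, show reps ≤ 0 by omega]
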